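-- pv_equiv track=rewrite | github.com/nonasking/algorithm-python | stack/examples/painting_over.py | solution
-- ===== SOURCE A (Python) =====
-- def solution(n, m, section):
--     result = 0
--     i = 0
--     while len(section) > 0:
--         start = section.pop(0)
--         while i < len(section):
--             if section[i] < start + m:
--                 section.pop(i)
--                 i -= 1
--             else:
--                 break
--             i += 1
--         result += 1
--     return result
-- ===== SOURCE B (Python) =====
-- def solution(n, m, section):
--     result = 0
--     end = None
--     while section:
--         x = section.pop(0)
--         if end is None or x >= end:
--             result += 1
--             end = x + m
--     return result
-- ===== Notes on version B (the rewrite author's own statement) =====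
-- stated objective: simpler
-- what changed: Replaced A's nested loops (outer stroke loop + inner index-juggling removal of covered elements) by one flat pass that keeps a single running coverage-end threshold; like A it empties the list via pop.
import Mathlib
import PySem

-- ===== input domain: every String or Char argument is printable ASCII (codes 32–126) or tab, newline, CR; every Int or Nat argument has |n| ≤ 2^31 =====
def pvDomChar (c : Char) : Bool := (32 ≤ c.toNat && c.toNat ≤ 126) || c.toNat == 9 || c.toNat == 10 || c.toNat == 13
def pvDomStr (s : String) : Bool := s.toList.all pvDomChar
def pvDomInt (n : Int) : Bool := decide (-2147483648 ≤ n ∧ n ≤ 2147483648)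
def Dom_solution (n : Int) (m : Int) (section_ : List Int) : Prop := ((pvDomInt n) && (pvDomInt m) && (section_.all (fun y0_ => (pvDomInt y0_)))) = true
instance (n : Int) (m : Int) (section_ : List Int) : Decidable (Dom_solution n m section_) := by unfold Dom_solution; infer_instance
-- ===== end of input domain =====

-- B replaces A's nested stroke/removal loops by one flat pass with a running
-- coverage-end threshold (objective: simpler).  Both Pythons empty `section`
-- in place; the equivalence proved here is about the return value only.

-- ===== PORT A =====
-- inner `while i < len(section)` loop of A; fuel bounds the iterations
-- (each removing step pops one element, so fuel = length suffices; the
-- `none` fallbacks of pyGet?/pop? are unreachable in actual runs, where i = 0).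
def solInnerA : Nat → Int → Int → Int → List Int → Int × List Int
  | 0, i, _, _, sec => (i, sec)
  | fuel + 1, i, start, m, sec =>
    if i < (sec.length : Int) then
      match PySem.List.pyGet? sec i with
      | some v =>
        if v < start + m then
          match PySem.List.pop? sec i with
          | some (_, rest) => solInnerA fuel (i - 1 + 1) start m rest
          | none => (i, sec)
        else (i, sec)
      | none => (i, sec)
    else (i, sec)

-- outer `while len(section) > 0` loop of A (each iteration pops the head,
-- so fuel = length suffices)
def solOuterA : Nat → Int → Int → Int → List Int → Int
  | 0, result, _, _, _ => result
  | fuel + 1, result, i, m, sec =>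
    if sec.length > 0 then
      match sec with
      | [] => result
      | start :: rest =>
        let p := solInnerA rest.length i start m rest
        solOuterA fuel (result + 1) p.1 m p.2
    else result

def solution (n : Int) (m : Int) (section_ : List Int) : Int :=
  solOuterA section_.length 0 0 m section_

-- ===== PORT B =====
-- single pass: end_ = none means no active stroke yet
def solLoopB (m : Int) (result : Int) (end_ : Option Int) : List Int → Int
  | [] => result
  | x :: rest =>
    match end_ with
    | none => solLoopB m (result + 1) (some (x + m)) rest
    | some e => if x ≥ e then solLoopB m (result + 1) (some (x + m)) rest
                else solLoopB m result (some e) rest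

def solution_alt (n : Int) (m : Int) (section_ : List Int) : Int :=
  solLoopB m 0 none section_

-- ===== PRECONDITION & SPEC =====
def Spec_solution (n : Int) (m : Int) (section_ : List Int) (out : Int) : Prop := out = solution_alt n m section_
instance (n : Int) (m : Int) (section_ : List Int) (out : Int) : Decidable (Spec_solution n m section_ out) := by unfold Spec_solution; infer_instance

-- ===== CLAIM (what is proved, stated in full; the proofs are below) =====
def Claim_equal_solution : Prop := ∀ (n : Int) (m : Int) (section_ : List Int), Dom_solution n m section_ → Spec_solution n m section_ (solution n m section_)

-- ===== LEMMAS AND PROOFS =====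

-- A's inner loop, started at i = 0 with enough fuel, strips the leading run
-- of elements below start + m and leaves i = 0.
theorem solInnerA_eq_dropWhile (start m : Int) :
    ∀ (fuel : Nat) (sec : List Int), sec.length ≤ fuel →
      solInnerA fuel 0 start m sec = (0, sec.dropWhile (fun v => decide (v < start + m))) := by
  intro fuel
  induction fuel with
  | zero =>
    intro sec h
    have : sec = [] := List.length_eq_zero_iff.mp (Nat.le_zero.mp h)
    simp [this, solInnerA]
  | succ k ih =>
    intro sec h
    cases sec with
    | nil => simp [solInnerA]
    | cons x xs =>
      by_cases hx : x < start + m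
      · have : (0 : Int) < ((x :: xs).length : Int) := by simp
        simp only [solInnerA, this, if_pos, PySem.List.pyGet?_zero_cons,
          PySem.List.pop?_zero_cons, hx, if_pos]
        have hlen : xs.length ≤ k := by simpa using Nat.succ_le_succ_iff.mp h
        simpa [List.dropWhile, hx] using ih xs hlen
      · have : (0 : Int) < ((x :: xs).length : Int) := by simp
        simp [solInnerA, hx, List.dropWhile]

-- B's loop with an active threshold e behaves like B's loop with no active
-- stroke on the list with the leading sub-threshold run removed.
theorem solLoopB_some_eq (m e : Int) :
    ∀ (sec : List Int) (res : Int),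
      solLoopB m res (some e) sec =
        solLoopB m res none (sec.dropWhile (fun v => decide (v < e))) := by
  intro sec
  induction sec with
  | nil => intro res; simp [solLoopB, List.dropWhile]
  | cons x xs ih =>
    intro res
    by_cases hx : x < e
    · have hge : ¬ x ≥ e := by omega
      simp [solLoopB, hge, List.dropWhile, hx, ih]
    · have hge : x ≥ e := by omega
      simp [solLoopB, hge, List.dropWhile, hx, solLoopB]

-- main invariant: A's outer loop (with i = 0, enough fuel) equals B's loop.
theorem solOuterA_eq_solLoopB (m : Int) :
    ∀ (fuel : Nat) (sec : List Int) (res : Int), sec.length ≤ fuel →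
      solOuterA fuel res 0 m sec = solLoopB m res none sec := by
  intro fuel
  induction fuel with
  | zero =>
    intro sec res h
    have : sec = [] := List.length_eq_zero_iff.mp (Nat.le_zero.mp h)
    simp [this, solOuterA, solLoopB]
  | succ k ih =>
    intro sec res h
    cases sec with
    | nil => simp [solOuterA, solLoopB]
    | cons start xs =>
      have hfuel : xs.length ≤ k := by simpa using Nat.succ_le_succ_iff.mp h
      have hdrop : (xs.dropWhile (fun v => decide (v < start + m))).length ≤ k :=
        le_trans (List.length_dropWhile_le _ _) hfuel
      simp only [solOuterA, List.length_cons, if_pos (Nat.succ_pos _),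
        solInnerA_eq_dropWhile start m xs.length xs le_rfl]
      rw [ih _ _ hdrop, solLoopB, ← solLoopB_some_eq]

-- ===== VERDICT (by name: the statement is the Claim_ definition above) =====
theorem solution_spec : Claim_equal_solution := by
  intro n m section_ _
  unfold Spec_solution solution solution_alt
  exact solOuterA_eq_solLoopB m section_.length section_ 0 le_rfl
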